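-- pv_equiv track=rewrite | github.com/ChernZeXin/TL4A_PFB_IGP | profitandloss.py | get_trend
-- ===== SOURCE A (Python) =====
-- def get_trend(profit_diff):
--     '''
--     Accepts a dict as argument.
--     Returns trend as string output.
--     '''
--     increasing = False
--     decreasing = False
--     for diff in profit_diff.values():
--         # If both increasing and decrease has occured in middle of loop, break loop.
--         if increasing and decreasing:
--             break
--
--         if diff > 0:
--             increasing = True
--         elif diff < 0:
--             decreasing = True
--
--     if increasing and decreasing:
--         return "fluctuate"
--     elif increasing:
--         return "increase"
--     else:
--         return "decrease"
-- ===== SOURCE B (Python) =====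
-- def get_trend(profit_diff):
--     vals = list(profit_diff.values())
--     mx = max(vals, default=0)
--     mn = min(vals, default=0)
--     if mx > 0 and mn < 0:
--         return "fluctuate"
--     if mx > 0:
--         return "increase"
--     return "decrease"
-- ===== Notes on version B (the rewrite author's own statement) =====
-- stated objective: alternative
-- what changed: Replaces the flag-carrying early-exit scan with two aggregate computations (max and min of the values) and derives the trend from their signs.
import Mathlib
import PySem

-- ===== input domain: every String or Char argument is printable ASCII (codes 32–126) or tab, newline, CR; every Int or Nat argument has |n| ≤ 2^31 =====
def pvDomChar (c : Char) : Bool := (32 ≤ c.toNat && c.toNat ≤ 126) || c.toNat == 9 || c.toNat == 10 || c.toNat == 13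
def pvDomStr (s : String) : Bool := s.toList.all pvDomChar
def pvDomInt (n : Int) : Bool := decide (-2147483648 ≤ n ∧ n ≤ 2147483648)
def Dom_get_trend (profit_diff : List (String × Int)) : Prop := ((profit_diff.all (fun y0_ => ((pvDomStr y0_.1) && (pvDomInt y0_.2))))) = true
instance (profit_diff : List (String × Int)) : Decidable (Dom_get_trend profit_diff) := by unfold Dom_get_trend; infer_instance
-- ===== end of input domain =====

-- ===== PORT A =====
-- A scans dict values with two flags and an early break once both are set.
def getTrendLoopA : List Int → Bool → Bool → Bool × Bool
  | [], inc, dec => (inc, dec)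
  | v :: rest, inc, dec =>
    if inc && dec then (inc, dec)
    else getTrendLoopA rest (if 0 < v then true else inc)
           (if 0 < v then dec else if v < 0 then true else dec)

def get_trend (profit_diff : List (String × Int)) : String :=
  let vals := (PySem.Dict.ofList profit_diff).values
  let r := getTrendLoopA vals false false
  if r.1 && r.2 then "fluctuate"
  else if r.1 then "increase"
  else "decrease"

-- ===== PORT B =====
-- B: max/min of the values (Python max(vals, default=0) / min(vals, default=0)), trend from their signs.
def get_trend_alt (profit_diff : List (String × Int)) : String :=
  let vals := (PySem.Dict.ofList profit_diff).values
  let mx := (PySem.List.max? vals (fun x => x)).getD 0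
  let mn := (PySem.List.min? vals (fun x => x)).getD 0
  if 0 < mx ∧ mn < 0 then "fluctuate"
  else if 0 < mx then "increase"
  else "decrease"

-- ===== PRECONDITION & SPEC =====
def Spec_get_trend (profit_diff : List (String × Int)) (out : String) : Prop := out = get_trend_alt profit_diff
instance (profit_diff : List (String × Int)) (out : String) : Decidable (Spec_get_trend profit_diff out) := by unfold Spec_get_trend; infer_instance

-- ===== CLAIM (what is proved, stated in full; the proofs are below) =====
def Claim_equal_get_trend : Prop := ∀ (profit_diff : List (String × Int)), Dom_get_trend profit_diff → Spec_get_trend profit_diff (get_trend profit_diff)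

-- ===== LEMMAS AND PROOFS =====
def pvRender (i d : Bool) : String :=
  if i && d then "fluctuate" else if i then "increase" else "decrease"

theorem getTrendLoopA_render (l : List Int) (inc dec : Bool) :
    pvRender (getTrendLoopA l inc dec).1 (getTrendLoopA l inc dec).2
      = pvRender (inc || l.any (fun v => decide (0 < v))) (dec || l.any (fun v => decide (v < 0))) := by
  induction l generalizing inc dec with
  | nil => simp [getTrendLoopA]
  | cons v rest ih =>
    by_cases h : inc && dec
    · obtain ⟨hi, hd⟩ : inc = true ∧ dec = true := by simpa using h
      simp [getTrendLoopA, hi, hd, pvRender]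
    · rw [getTrendLoopA, if_neg h, ih]
      rcases lt_trichotomy (0 : Int) v with hv | hv | hv
      · simp [hv, not_lt_of_gt hv, pvRender]
      · simp [← hv]
      · simp [hv, not_lt_of_gt hv]

theorem max_getD_pos_iff (l : List Int) :
    (0 < (PySem.List.max? l (fun x => x)).getD 0) ↔ l.any (fun v => decide (0 < v)) = true := by
  cases hl : PySem.List.max? l (fun x => x) with
  | none =>
    have : l = [] := (PySem.List.max?_eq_none_iff _ _).mp hl
    simp [this]
  | some m =>
    have hmem := PySem.List.max?_mem hl
    have hmax := PySem.List.max?_isMax hl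
    simp only [Option.getD_some, List.any_eq_true, decide_eq_true_eq]
    constructor
    · intro hm; exact ⟨m, hmem, hm⟩
    · rintro ⟨y, hy, hy0⟩; exact lt_of_lt_of_le hy0 (hmax y hy)

theorem min_getD_neg_iff (l : List Int) :
    ((PySem.List.min? l (fun x => x)).getD 0 < 0) ↔ l.any (fun v => decide (v < 0)) = true := by
  cases hl : PySem.List.min? l (fun x => x) with
  | none =>
    have : l = [] := (PySem.List.min?_eq_none_iff _ _).mp hl
    simp [this]
  | some m =>
    have hmem := PySem.List.min?_mem hl
    have hmin := PySem.List.min?_isMin hl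
    simp only [Option.getD_some, List.any_eq_true, decide_eq_true_eq]
    constructor
    · intro hm; exact ⟨m, hmem, hm⟩
    · rintro ⟨y, hy, hy0⟩; exact lt_of_le_of_lt (hmin y hy) hy0

-- ===== VERDICT (by name: the statement is the Claim_ definition above) =====
theorem get_trend_spec : Claim_equal_get_trend := by
  intro pd _
  unfold Spec_get_trend
  have hA : get_trend pd
      = pvRender ((PySem.Dict.ofList pd).values.any (fun v => decide (0 < v)))
                 ((PySem.Dict.ofList pd).values.any (fun v => decide (v < 0))) := by
    have h := getTrendLoopA_render (PySem.Dict.ofList pd).values false false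
    simp only [Bool.false_or] at h
    exact h
  rw [hA]
  have hmx := max_getD_pos_iff (PySem.Dict.ofList pd).values
  have hmn := min_getD_neg_iff (PySem.Dict.ofList pd).values
  show _ = (if 0 < (PySem.List.max? (PySem.Dict.ofList pd).values (fun x => x)).getD 0
                ∧ (PySem.List.min? (PySem.Dict.ofList pd).values (fun x => x)).getD 0 < 0
            then "fluctuate"
            else if 0 < (PySem.List.max? (PySem.Dict.ofList pd).values (fun x => x)).getD 0
            then "increase" else "decrease")
  split_ifs with h1 h2
  · simp [pvRender, hmx.mp h1.1, hmn.mp h1.2]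
  · have hp := hmx.mp h2
    have hn : ((PySem.Dict.ofList pd).values.any (fun v => decide (v < 0))) = false := by
      cases hq : ((PySem.Dict.ofList pd).values.any (fun v => decide (v < 0))) with
      | false => rfl
      | true => exact absurd ⟨h2, hmn.mpr hq⟩ h1
    simp [pvRender, hp, hn]
  · have hp : ((PySem.Dict.ofList pd).values.any (fun v => decide (0 < v))) = false := by
      cases hq : ((PySem.Dict.ofList pd).values.any (fun v => decide (0 < v))) with
      | false => rfl
      | true => exact absurd (hmx.mpr hq) h2
    simp [pvRender, hp]
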